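-- pv_equiv track=rewrite | github.com/jepebe/aoc2018 | aoc2017/day15.py | bgen
-- ===== SOURCE A (Python) =====
-- def bgen(b, n):
--     i = 0
--     while i < n:
--         b = (b * 48271) % 2147483647
--
--         if ((b >> 3) << 3) != b:
--             continue
--
--         yield b
--         i += 1
-- ===== SOURCE B (Python) =====
-- def bgen(b, n):
--     # Batch strategy: over-generate raw LCG values in fixed-size blocks, filter each
--     # block with a list comprehension, accumulate matches until at least n, then
--     # truncate to the first n (instead of a per-value counting loop with `continue`).
--     CHUNK = 1024
--     matches = []
--     while len(matches) < n:
--         block = []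
--         for _ in range(CHUNK):
--             b = (b * 48271) % 2147483647
--             block.append(b)
--         matches += [x for x in block if x % 8 == 0]
--     yield from matches[:n]
-- ===== Notes on version B (the rewrite author's own statement) =====
-- stated objective: alternative
-- what changed: Replaces the per-value counting loop with continue and a bit-shift test by block-batched generation: fixed-size blocks of raw LCG values are materialised as lists, each block is filtered with a list comprehension (x % 8 == 0), matches accumulate until at least n are found, and the result is the truncation matches[:n] (over-generate then cut).
import Mathlib
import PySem

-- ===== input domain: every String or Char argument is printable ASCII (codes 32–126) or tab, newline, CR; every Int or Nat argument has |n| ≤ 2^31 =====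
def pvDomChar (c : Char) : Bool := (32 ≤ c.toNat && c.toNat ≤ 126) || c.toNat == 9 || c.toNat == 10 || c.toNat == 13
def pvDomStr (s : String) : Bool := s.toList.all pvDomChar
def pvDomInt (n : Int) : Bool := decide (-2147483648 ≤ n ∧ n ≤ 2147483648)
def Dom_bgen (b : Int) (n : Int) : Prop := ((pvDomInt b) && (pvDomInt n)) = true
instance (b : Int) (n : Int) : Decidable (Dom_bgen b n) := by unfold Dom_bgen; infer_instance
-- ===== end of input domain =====

-- B replaces A's per-value counting loop (with `continue` and a shift test) by block-batched
-- generation: blocks of raw LCG values are filtered as lists, accumulated until ≥ n matches,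
-- then truncated to the first n (objective: alternative); return values are proved identical.
-- Both ports carry the same raw-step fuel budget purely as a totality guard for the unbounded
-- Python loops; fuel exhaustion truncates both to the same matches.
def pvFuel (n : Int) : Nat := 65536 * n.toNat + 65536
def pvChunk : Nat := 1024
def pvChunkFuel (n : Int) : Nat := 64 * n.toNat + 64   -- same budget in blocks of pvChunk

-- ===== PORT A =====
-- Python's `(b >> 3) << 3` is exactly floor-division by 8 times 8 (>> k floors by 2^k for all ints).
def bgenAux (fuel : Nat) (b : Int) (i : Int) (n : Int) (acc : List Int) : List Int :=
  match fuel with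
  | 0 => acc.reverse
  | f + 1 =>
    if i < n then
      let b' := PySem.Int.mod (b * 48271) 2147483647
      if PySem.Int.floordiv b' 8 * 8 ≠ b' then
        bgenAux f b' i n acc
      else
        bgenAux f b' (i + 1) n (b' :: acc)
    else acc.reverse

def bgen (b : Int) (n : Int) : List Int := bgenAux (pvFuel n) b 0 n []

-- ===== PORT B =====
-- inner `for _ in range(CHUNK)` loop: builds the block list and the final LCG state
def bgenBlock (k : Nat) (b : Int) : List Int × Int :=
  match k with
  | 0 => ([], b)
  | k + 1 =>
    let b' := PySem.Int.mod (b * 48271) 2147483647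
    let p := bgenBlock k b'
    (b' :: p.1, p.2)

-- outer `while len(matches) < n` loop accumulating filtered blocks
def bgenAltLoop (fuel : Nat) (b : Int) (ms : List Int) (n : Int) : List Int :=
  match fuel with
  | 0 => ms
  | f + 1 =>
    if (ms.length : Int) < n then
      let p := bgenBlock pvChunk b
      bgenAltLoop f p.2 (ms ++ p.1.filter (fun x => PySem.Int.mod x 8 = 0)) n
    else ms

def bgen_alt (b : Int) (n : Int) : List Int :=
  PySem.List.slice (bgenAltLoop (pvChunkFuel n) b [] n) none (some n)   -- matches[:n]

-- ===== PRECONDITION & SPEC =====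
def Spec_bgen (b : Int) (n : Int) (out : List Int) : Prop := out = bgen_alt b n
instance (b : Int) (n : Int) (out : List Int) : Decidable (Spec_bgen b n out) := by unfold Spec_bgen; infer_instance

-- ===== CLAIM (what is proved, stated in full; the proofs are below) =====
def Claim_equal_bgen : Prop := ∀ (b : Int) (n : Int), Dom_bgen b n → Spec_bgen b n (bgen b n)

-- ===== LEMMAS AND PROOFS =====
-- the raw LCG stream of k values from state b, and the state after k steps
def pvRaws (k : Nat) (b : Int) : List Int :=
  match k with
  | 0 => []
  | k + 1 => PySem.Int.mod (b * 48271) 2147483647 :: pvRaws k (PySem.Int.mod (b * 48271) 2147483647)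

def pvSt (k : Nat) (b : Int) : Int :=
  match k with
  | 0 => b
  | k + 1 => pvSt k (PySem.Int.mod (b * 48271) 2147483647)

def pvFilt (l : List Int) : List Int := l.filter (fun x => PySem.Int.mod x 8 = 0)

theorem mul_eight_iff_mod (x : Int) : PySem.Int.floordiv x 8 * 8 = x ↔ PySem.Int.mod x 8 = 0 := by
  have h := PySem.Int.floordiv_mul_add_mod x 8
  omega

theorem filt_nil : pvFilt [] = [] := rfl

theorem filt_cons_pos (x : Int) (l : List Int) (h : PySem.Int.mod x 8 = 0) :
    pvFilt (x :: l) = x :: pvFilt l := by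
  have hd : (8:Int) ∣ x := (PySem.Int.mod_eq_zero_iff_dvd x 8).mp h
  simp [pvFilt, hd]

theorem filt_cons_neg (x : Int) (l : List Int) (h : ¬ PySem.Int.mod x 8 = 0) :
    pvFilt (x :: l) = pvFilt l := by
  have hd : ¬ (8:Int) ∣ x := fun hc => h ((PySem.Int.mod_eq_zero_iff_dvd x 8).mpr hc)
  simp [pvFilt, hd]

theorem filt_append (l₁ l₂ : List Int) : pvFilt (l₁ ++ l₂) = pvFilt l₁ ++ pvFilt l₂ := by
  simp [pvFilt, List.filter_append]

theorem block_eq (k : Nat) : ∀ b : Int, bgenBlock k b = (pvRaws k b, pvSt k b) := by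
  induction k with
  | zero => intro b; rfl
  | succ k ih => intro b; simp [bgenBlock, pvRaws, pvSt, ih]

theorem block_fst (k : Nat) (b : Int) : (bgenBlock k b).1 = pvRaws k b := by rw [block_eq]

theorem block_snd (k : Nat) (b : Int) : (bgenBlock k b).2 = pvSt k b := by rw [block_eq]

theorem altLoop_succ (f : Nat) (b : Int) (ms : List Int) (n : Int) :
    bgenAltLoop (f + 1) b ms n =
      if (ms.length : Int) < n then
        bgenAltLoop f (bgenBlock pvChunk b).2 (ms ++ pvFilt (bgenBlock pvChunk b).1) n
      else ms := rfl

theorem raws_add (a : Nat) : ∀ (c : Nat) (b : Int),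
    pvRaws (a + c) b = pvRaws a b ++ pvRaws c (pvSt a b) := by
  induction a with
  | zero => intro c b; simp [pvRaws, pvSt]
  | succ a ih =>
    intro c b
    have h : a + 1 + c = (a + c) + 1 := by omega
    rw [h]
    simp [pvRaws, pvSt, ih]

-- A's loop computes: take n of the filtered raw stream of its fuel budget
theorem bgenAux_eq (fuel : Nat) : ∀ (b i n : Int) (acc : List Int),
    bgenAux fuel b i n acc = acc.reverse ++ (pvFilt (pvRaws fuel b)).take (n - i).toNat := by
  induction fuel with
  | zero => intro b i n acc; simp [bgenAux, pvRaws, filt_nil]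
  | succ f ih =>
    intro b i n acc
    by_cases h : i < n
    · have hk : (n - i).toNat = (n - (i + 1)).toNat + 1 := by omega
      by_cases hm : PySem.Int.mod (PySem.Int.mod (b * 48271) 2147483647) 8 = 0
      · rw [show bgenAux (f+1) b i n acc =
            bgenAux f (PySem.Int.mod (b * 48271) 2147483647) (i + 1) n
              (PySem.Int.mod (b * 48271) 2147483647 :: acc) from by
              simp only [bgenAux, if_pos h, if_neg (not_not_intro ((mul_eight_iff_mod _).mpr hm))]]
        rw [ih, hk,
          show pvRaws (f+1) b = PySem.Int.mod (b * 48271) 2147483647 ::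
            pvRaws f (PySem.Int.mod (b * 48271) 2147483647) from rfl,
          filt_cons_pos _ _ hm, List.take_succ_cons]
        simp
      · rw [show bgenAux (f+1) b i n acc =
            bgenAux f (PySem.Int.mod (b * 48271) 2147483647) i n acc from by
              simp only [bgenAux, if_pos h,
                if_pos (fun hc => hm ((mul_eight_iff_mod _).mp hc))]]
        rw [ih,
          show pvRaws (f+1) b = PySem.Int.mod (b * 48271) 2147483647 ::
            pvRaws f (PySem.Int.mod (b * 48271) 2147483647) from rfl,
          filt_cons_neg _ _ hm]
    · have hk : (n - i).toNat = 0 := by omega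
      simp [bgenAux, if_neg h, hk]

-- B's loop, truncated to n, equals the filtered full-budget stream truncated to n
theorem bgenAltLoop_take (fuel : Nat) : ∀ (b : Int) (k : Nat) (ms : List Int),
    (bgenAltLoop fuel b ms (k : Int)).take k = (ms ++ pvFilt (pvRaws (pvChunk * fuel) b)).take k := by
  induction fuel with
  | zero => intro b k ms; simp [bgenAltLoop, pvRaws, filt_nil]
  | succ f ih =>
    intro b k ms
    by_cases h : (ms.length : Int) < (k : Int)
    · rw [altLoop_succ, if_pos h, block_fst, block_snd]
      rw [ih,
        show pvChunk * (f + 1) = pvChunk + pvChunk * f from by ring, raws_add, filt_append,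
        List.append_assoc]
    · rw [altLoop_succ, if_neg h]
      have hle : k ≤ ms.length := by omega
      rw [List.take_append_of_le_length hle]

-- ===== VERDICT (by name: the statement is the Claim_ definition above) =====
theorem bgen_spec : Claim_equal_bgen := by
  intro b n _
  show bgen b n = bgen_alt b n
  by_cases hn : 0 ≤ n
  · obtain ⟨m, rfl⟩ : ∃ m : Nat, n = (m : Int) := ⟨n.toNat, by omega⟩
    rw [bgen, bgen_alt, bgenAux_eq, PySem.List.slice_to_natCast,
      bgenAltLoop_take (pvChunkFuel (m : Int)) b m []]
    rw [show pvChunk * pvChunkFuel (m : Int) = pvFuel (m : Int) from by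
      simp only [pvChunk, pvChunkFuel, pvFuel]; ring]
    rw [show ((m : Int) - 0) = (m : Int) from by ring, Int.toNat_natCast, List.nil_append,
      List.reverse_nil, List.nil_append]
  · -- n < 0 (or n = 0 handled above): both sides are []
    rw [bgen, bgen_alt, bgenAux_eq]
    have hA : (n - 0).toNat = 0 := by omega
    rw [hA]
    have hB : bgenAltLoop (pvChunkFuel n) b [] n = [] := by
      cases hcf : pvChunkFuel n with
      | zero => rfl
      | succ f =>
        rw [altLoop_succ, if_neg (by simp; omega)]
    rw [hB]
    simp [PySem.List.slice]
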